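-- pv_equiv track=rewrite | github.com/Yeaaahhhhh/Foinmation-trevial-looben | src/query_program.py | organized
-- ===== SOURCE A (Python) =====
-- def organized(Q):
--     '''
--     Function: This function will edit a bit of the input query, make sure the editted query does not have empty string
--
--     Argument: Q, the query user input
--
--     Return: return a complete no empty spaces string
--     '''
--     Q = Q.split(' ')
--
--     happyList = []  # a list that contain a bunch of terms, zones, logic operators.
--
--     for i in range(0,len(Q)):
--         if Q[i]:
--             happyList.append(Q[i])
--
--     sentence = " ".join(happyList)   #turn the list element into a string
--
--     return sentence
-- ===== SOURCE B (Python) =====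
-- def organized(Q):
--     out = []
--     pending = False
--     for c in Q:
--         if c == ' ':
--             if out:
--                 pending = True
--         else:
--             if pending:
--                 out.append(' ')
--                 pending = False
--             out.append(c)
--     return ''.join(out)
-- ===== Notes on version B (the rewrite author's own statement) =====
-- stated objective: alternative
-- what changed: Replaced split-on-space + filter-nonempty + join (which materialises a token list) with a single character-level state machine that collapses space runs and drops leading/trailing spaces while building the output directly; trades CPython's C-level split/join for an explicit one-pass loop.
import Mathlib
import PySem

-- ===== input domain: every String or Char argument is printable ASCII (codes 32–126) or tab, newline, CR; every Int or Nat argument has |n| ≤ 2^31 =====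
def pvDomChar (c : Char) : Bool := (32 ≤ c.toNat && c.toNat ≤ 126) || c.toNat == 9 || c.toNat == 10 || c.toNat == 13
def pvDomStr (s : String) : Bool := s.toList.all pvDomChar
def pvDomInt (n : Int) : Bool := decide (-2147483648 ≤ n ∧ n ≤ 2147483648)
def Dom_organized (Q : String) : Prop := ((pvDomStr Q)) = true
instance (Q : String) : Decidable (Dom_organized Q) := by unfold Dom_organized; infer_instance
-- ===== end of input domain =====

-- B: a one-pass character state machine that collapses space runs and trims edge spaces, instead of A's split/filter/join over a token list (alternative decomposition, same O(n)).

-- ===== PORT A =====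
-- Q.split(' '): sep " " is nonempty, so Str.split? always returns some; .getD [] is never taken.
def organized (Q : String) : String :=
  let Qs : List String := (PySem.Str.split? Q " ").getD []
  let happyList : List String :=
    (PySem.List.pyRange 0 (PySem.List.len Qs)).foldl
      (fun acc i =>
        if PySem.List.pyGetD Qs i "" ≠ "" then acc ++ [PySem.List.pyGetD Qs i ""] else acc) []
  PySem.Str.join " " happyList

-- ===== PORT B =====
-- Source B's loop body: state = (out, pending)
-- B's loop step
def bstep (st : List Char × Bool) (c : Char) : List Char × Bool :=
  if c = ' ' then
    (st.1, if st.1 ≠ [] then true else st.2)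
  else
    let st' := if st.2 then (st.1 ++ [' '], false) else st
    (st'.1 ++ [c], st'.2)

-- the for-loop over Q, then ''.join(out)
def organized_alt (Q : String) : String :=
  let st := Q.toList.foldl bstep ([], false)
  String.ofList st.1

-- ===== PRECONDITION & SPEC =====
def Spec_organized (Q : String) (out : String) : Prop := out = organized_alt Q
instance (Q : String) (out : String) : Decidable (Spec_organized Q out) := by unfold Spec_organized; infer_instance

-- ===== CLAIM (what is proved, stated in full; the proofs are below) =====
def Claim_equal_organized : Prop := ∀ (Q : String), Dom_organized Q → Spec_organized Q (organized Q)

-- ===== LEMMAS AND PROOFS =====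

-- structural form of Q.split(' ') : split at each ' ', `pre` the chars of the current piece
def mySplit : List Char → List Char → List (List Char)
  | pre, [] => [pre]
  | pre, c :: r => if c = ' ' then pre :: mySplit [] r else mySplit (pre ++ [c]) r

-- the tail B still owes when pending: a separating space iff more words follow
def spJ (xs : List (List Char)) : List Char :=
  if List.intercalate [' '] xs = [] then [] else ' ' :: List.intercalate [' '] xs

lemma splitOn_go_eq (fuel : Nat) :
    ∀ (l cur : List Char) (accs : List (List Char)), l.length ≤ fuel →
      PySem.Chars.splitOn.go [' '] fuel l cur accs = accs.reverse ++ mySplit cur.reverse l := by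
  induction fuel with
  | zero =>
    intro l cur accs h
    have : l = [] := List.eq_nil_of_length_eq_zero (Nat.le_zero.mp h)
    subst this
    simp [PySem.Chars.splitOn.go, mySplit]
  | succ f ih =>
    intro l cur accs h
    cases l with
    | nil => simp [PySem.Chars.splitOn.go, mySplit]
    | cons c r =>
      by_cases hc : c = ' '
      · subst hc
        rw [show PySem.Chars.splitOn.go [' '] (f+1) (' ' :: r) cur accs
              = PySem.Chars.splitOn.go [' '] f r [] (cur.reverse :: accs) by
            simp [PySem.Chars.splitOn.go, List.isPrefixOf]]
        rw [ih r [] (cur.reverse :: accs) (by simpa using Nat.le_of_succ_le_succ h)]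
        simp [mySplit]
      · rw [show PySem.Chars.splitOn.go [' '] (f+1) (c :: r) cur accs
              = PySem.Chars.splitOn.go [' '] f r (c :: cur) accs by
            simp only [PySem.Chars.splitOn.go, List.isPrefixOf]
            rw [if_neg (by simp [Ne.symm hc])]]
        rw [ih r (c :: cur) accs (by simpa using Nat.le_of_succ_le_succ h)]
        simp [mySplit, hc]

lemma splitOn_eq_mySplit (s : List Char) :
    PySem.Chars.splitOn s [' '] = mySplit [] s := by
  have := splitOn_go_eq (s.length + 1) s [] [] (by omega)
  simpa [PySem.Chars.splitOn] using this

lemma intercalate_cons (s : List Char) (x : List Char) (xs : List (List Char)) :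
    List.intercalate s (x :: xs) = x ++ if xs = [] then [] else s ++ List.intercalate s xs := by
  cases xs <;> simp [List.intercalate, List.intersperse]

lemma intercalate_filter_ne_nil (xs : List (List Char)) :
    List.intercalate [' '] (xs.filter (fun p => p ≠ [])) = [] ↔
      xs.filter (fun p => p ≠ []) = [] := by
  cases h : xs.filter (fun p => p ≠ []) with
  | nil => simp [List.intercalate]
  | cons y ys =>
    have hmem : y ∈ xs.filter (fun p => p ≠ []) := by rw [h]; simp
    have hy : y ≠ [] := by simpa using (List.mem_filter.mp hmem).2
    rw [intercalate_cons]
    constructor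
    · intro hcontra
      exact absurd (List.append_eq_nil_iff.mp hcontra).1 hy
    · intro hcontra; exact absurd hcontra (by simp)

-- mySplit with a nonempty current piece always yields at least one nonempty piece
lemma mySplit_has_ne (l : List Char) :
    ∀ pre : List Char, pre ≠ [] → ∃ x ∈ mySplit pre l, x ≠ [] := by
  induction l with
  | nil => intro pre hpre; exact ⟨pre, by simp [mySplit], hpre⟩
  | cons c r ih =>
    intro pre hpre
    by_cases hc : c = ' '
    · subst hc; exact ⟨pre, by simp [mySplit], hpre⟩
    · obtain ⟨x, hx, hxne⟩ := ih (pre ++ [c]) (by simp)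
      exact ⟨x, by simp [mySplit, hc]; exact hx, hxne⟩

lemma filter_mySplit_ne_nil (l : List Char) (pre : List Char) (hpre : pre ≠ []) :
    (mySplit pre l).filter (fun p => p ≠ []) ≠ [] := by
  obtain ⟨x, hx, hxne⟩ := mySplit_has_ne l pre hpre
  intro hcontra
  have := List.filter_eq_nil_iff.mp hcontra x hx
  simp [hxne] at this

-- joint invariant for B's fold: pending-state and in-word state
lemma bfold_key (l : List Char) :
    (∀ out : List Char, out ≠ [] →
      (l.foldl bstep (out, true)).1
        = out ++ spJ ((mySplit [] l).filter (fun p => p ≠ []))) ∧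
    (∀ pre out : List Char, pre ≠ [] →
      (l.foldl bstep (out ++ pre, false)).1
        = out ++ List.intercalate [' '] ((mySplit pre l).filter (fun p => p ≠ []))) := by
  induction l with
  | nil =>
    constructor
    · intro out hout; simp [mySplit, spJ, List.intercalate]
    · intro pre out hpre; simp [mySplit, List.intercalate, hpre]
  | cons c r ih =>
    obtain ⟨ih1, ih2⟩ := ih
    constructor
    · intro out hout
      by_cases hc : c = ' '
      · subst hc
        rw [List.foldl_cons, show bstep (out, true) ' ' = (out, true) by
          simp [bstep, hout]]
        rw [ih1 out hout]
        simp [mySplit]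
      · rw [List.foldl_cons, show bstep (out, true) c = ((out ++ [' ']) ++ [c], false) by
          simp [bstep, hc]]
        rw [ih2 [c] (out ++ [' ']) (by simp)]
        have hJ : List.intercalate [' '] ((mySplit [c] r).filter (fun p => p ≠ [])) ≠ [] :=
          fun hcontra =>
            filter_mySplit_ne_nil r [c] (by simp) ((intercalate_filter_ne_nil _).mp hcontra)
        simp [mySplit, hc, spJ, List.append_assoc]
        simpa using hJ
    · intro pre out hpre
      by_cases hc : c = ' '
      · subst hc
        rw [List.foldl_cons, show bstep (out ++ pre, false) ' ' = (out ++ pre, true) by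
          simp [bstep, hpre]]
        rw [ih1 (out ++ pre) (by simp [hpre])]
        have hfc : (mySplit pre (' ' :: r)).filter (fun p => p ≠ [])
            = pre :: (mySplit [] r).filter (fun p => p ≠ []) := by
          simp [mySplit, hpre]
        rw [hfc, intercalate_cons]
        by_cases hfil : (mySplit [] r).filter (fun p => p ≠ []) = []
        · rw [hfil]
          simp [spJ, List.intercalate]
        · have hJ : ¬ List.intercalate [' '] ((mySplit [] r).filter (fun p => p ≠ [])) = [] :=
            fun hcontra => hfil ((intercalate_filter_ne_nil _).mp hcontra)
          simp only [spJ]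
          rw [if_neg hJ, if_neg hfil]
          simp [List.append_assoc]
      · rw [List.foldl_cons, show bstep (out ++ pre, false) c = (out ++ (pre ++ [c]), false) by
          simp [bstep, hc, List.append_assoc]]
        rw [ih2 (pre ++ [c]) out (by simp)]
        simp [mySplit, hc]

lemma bfold_zero (l : List Char) :
    (l.foldl bstep ([], false)).1
      = List.intercalate [' '] ((mySplit [] l).filter (fun p => p ≠ [])) := by
  induction l with
  | nil => simp [List.intercalate, mySplit]
  | cons c r ih =>
    by_cases hc : c = ' '
    · subst hc
      rw [List.foldl_cons, show bstep ([], false) ' ' = ([], false) by simp [bstep]]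
      rw [ih]; simp [mySplit]
    · rw [List.foldl_cons, show bstep ([], false) c = ([] ++ [c], false) by simp [bstep, hc]]
      rw [(bfold_key r).2 [c] [] (by simp)]
      simp [mySplit, hc]

lemma filter_map_ofList (ps : List (List Char)) :
    (ps.map String.ofList).filter (fun s => s ≠ "")
      = (ps.filter (fun p => p ≠ [])).map String.ofList := by
  induction ps with
  | nil => simp
  | cons p ps ih =>
    by_cases hp : p = []
    · subst hp; simpa using ih
    · have h1 : String.ofList p ≠ "" := by simpa using hp
      rw [List.map_cons, List.filter_cons, List.filter_cons]
      rw [if_pos (by simpa using h1), if_pos (by simpa using hp)]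
      rw [List.map_cons, ih]

-- ===== VERDICT (by name: the statement is the Claim_ definition above) =====
theorem organized_spec : Claim_equal_organized := by
  intro Q _
  unfold Spec_organized organized organized_alt
  have hsplit : PySem.Str.split? Q " "
      = some ((mySplit [] Q.toList).map String.ofList) := by
    simp [PySem.Str.split?, PySem.Chars.split?, splitOn_eq_mySplit]
  rw [hsplit]
  simp only [Option.getD_some]
  rw [PySem.List.foldl_pyRange_pyGetD ((mySplit [] Q.toList).map String.ofList) ""
      (fun acc x => if x ≠ "" then acc ++ [x] else acc) [] (le_refl 0)]
  simp only [Int.toNat_zero, List.drop_zero]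
  rw [PySem.List.foldl_append_ite_eq_filter (fun s => s ≠ "")
        ((mySplit [] Q.toList).map String.ofList) []]
  rw [List.nil_append, filter_map_ofList]
  rw [← String.toList_inj, PySem.Str.toList_join]
  simp only [List.map_map]
  have hmm : (String.toList ∘ String.ofList) = id := by
    funext l; simp
  rw [hmm, List.map_id]
  rw [show (" " : String).toList = [' '] from rfl]
  rw [show (String.ofList ((Q.toList.foldl bstep ([], false)).1)).toList
        = (Q.toList.foldl bstep ([], false)).1 by simp]
  rw [bfold_zero]
  rfl
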